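-- pv_equiv track=rewrite | github.com/KwonYoungbin/Programmers-Practice | Python/Level3/110 옮기기.py | solution
-- ===== SOURCE A (Python) =====
-- from collections import deque
--
-- def solution(s):
--     answer = []
--     for string in s:
--         cnt = 0
--         stack = []
--         for a in string:
--             if len(stack) >= 2 and stack[-2:] == ['1', '1'] and a == '0':
--                 cnt += 1
--                 stack.pop()
--                 stack.pop()
--             else:
--                 stack.append(a)
--
--         if cnt == 0:
--             answer.append(string)
--         else:
--             q = deque()
--             while stack:
--                 if stack[-1] == '1':
--                     q.append(stack.pop())
--                 else:
--                     break
--             while cnt > 0: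
--                 q.appendleft('0')
--                 q.appendleft('1')
--                 q.appendleft('1')
--                 cnt -= 1
--             while stack:
--                 q.appendleft(stack.pop())
--             answer.append(''.join(q))
--
--     return answer
-- ===== SOURCE B (Python) =====
-- def solution(s):
--     # Run-length formulation: instead of a character stack, keep only the count of
--     # trailing '1's (ones) plus a list of (ones, ch) runs for everything settled;
--     # a '0' arriving while ones >= 2 just does cnt += 1, ones -= 2. The answer is
--     # assembled directly from the runs, the removed blocks, and the trailing ones.
--     answer = []
--     for string in s:
--         cnt = 0
--         ones = 0
--         runs = []  # (k, ch): k '1's followed by ch, where ch != '1'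
--         for ch in string:
--             if ch == '1':
--                 ones += 1
--             elif ch == '0' and ones >= 2:
--                 cnt += 1
--                 ones -= 2
--             else:
--                 runs.append((ones, ch))
--                 ones = 0
--         answer.append(''.join('1' * k + c for k, c in runs)
--                       + '110' * cnt + '1' * ones)
--     return answer
-- ===== Notes on version B (the rewrite author's own statement) =====
-- stated objective: alternative
-- what changed: B replaces A's character stack (with slice comparisons, deque pop/prepend reassembly and a cnt==0 special case) by a run-length state: only the count of trailing '1's plus a list of (ones, ch) runs is maintained, a '0' with ones>=2 is pure counter arithmetic, and the answer is assembled directly from runs + '110'*cnt + '1'*ones.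
import Mathlib
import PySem

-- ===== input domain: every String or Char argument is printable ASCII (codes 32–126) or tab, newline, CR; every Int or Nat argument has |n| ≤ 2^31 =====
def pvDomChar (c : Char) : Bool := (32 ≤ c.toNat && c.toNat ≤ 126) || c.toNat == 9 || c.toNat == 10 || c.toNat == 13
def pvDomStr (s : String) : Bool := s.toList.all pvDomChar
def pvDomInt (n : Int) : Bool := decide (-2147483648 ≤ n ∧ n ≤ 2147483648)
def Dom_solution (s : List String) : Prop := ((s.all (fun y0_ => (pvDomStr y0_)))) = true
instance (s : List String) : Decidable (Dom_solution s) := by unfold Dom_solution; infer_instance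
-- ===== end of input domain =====

-- B replaces A's character stack and deque reassembly by run-length counters
-- (trailing-'1' count + a list of (ones, ch) runs) with direct output assembly;
-- objective: alternative (same asymptotic cost).

-- ===== PORT A =====
-- inner for-loop body: state is (cnt, stack)
def aStep (st : Nat × List Char) (a : Char) : Nat × List Char :=
  let cnt := st.1
  let stack := st.2
  if 2 ≤ stack.length ∧ PySem.List.slice stack (some (-2)) none = ['1', '1'] ∧ a = '0' then
    (cnt + 1, stack.dropLast.dropLast)          -- cnt += 1; stack.pop(); stack.pop()
  else
    (cnt, stack ++ [a])                          -- stack.append(a)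

-- while stack: if stack[-1] == '1': q.append(stack.pop()) else: break
def aPopOnes (stack q : List Char) : List Char × List Char :=
  match h : stack.getLast? with
  | some c => if c = '1' then aPopOnes stack.dropLast (q ++ [c]) else (q, stack)
  | none => (q, stack)
termination_by stack.length
decreasing_by
  have : stack ≠ [] := by intro hn; simp [hn] at h
  simpa [List.length_dropLast] using Nat.sub_lt (List.length_pos_of_ne_nil this) one_pos

-- while cnt > 0: q.appendleft('0'); q.appendleft('1'); q.appendleft('1'); cnt -= 1
def aAddBlocks : Nat → List Char → List Char
  | 0, q => q
  | n + 1, q => aAddBlocks n ('1' :: '1' :: '0' :: q)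

-- while stack: q.appendleft(stack.pop())
def aPrepend (stack q : List Char) : List Char :=
  match h : stack.getLast? with
  | some c => aPrepend stack.dropLast (c :: q)
  | none => q
termination_by stack.length
decreasing_by
  have : stack ≠ [] := by intro hn; simp [hn] at h
  simpa [List.length_dropLast] using Nat.sub_lt (List.length_pos_of_ne_nil this) one_pos

def solution (s : List String) : List String :=
  s.foldl (fun answer string =>
    let r := string.toList.foldl aStep (0, [])
    if r.1 = 0 then
      answer ++ [string]
    else
      let p := aPopOnes r.2 []
      answer ++ [String.ofList (aPrepend p.2 (aAddBlocks r.1 p.1))]) []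

-- ===== PORT B =====
-- inner for-loop body: state is (cnt, ones, runs)
def bStep (st : Nat × Nat × List (Nat × Char)) (ch : Char) : Nat × Nat × List (Nat × Char) :=
  if ch = '1' then
    (st.1, st.2.1 + 1, st.2.2)                       -- ones += 1
  else if ch = '0' ∧ 2 ≤ st.2.1 then
    (st.1 + 1, st.2.1 - 2, st.2.2)                   -- cnt += 1; ones -= 2
  else
    (st.1, 0, st.2.2 ++ [(st.2.1, ch)])              -- runs.append((ones, ch)); ones = 0

-- ''.join('1' * k + c for k, c in runs)
def decodeRuns (runs : List (Nat × Char)) : List Char :=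
  (runs.map (fun r => List.replicate r.1 '1' ++ [r.2])).flatten

def solution_alt (s : List String) : List String :=
  s.map (fun string =>
    let r := string.toList.foldl bStep (0, 0, [])
    String.ofList (decodeRuns r.2.2
      ++ (List.replicate r.1 ['1', '1', '0']).flatten
      ++ List.replicate r.2.1 '1'))

-- ===== PRECONDITION & SPEC =====
def Spec_solution (s : List String) (out : List String) : Prop := out = solution_alt s
instance (s : List String) (out : List String) : Decidable (Spec_solution s out) := by unfold Spec_solution; infer_instance

-- ===== CLAIM (what is proved, stated in full; the proofs are below) =====
def Claim_equal_solution : Prop := ∀ (s : List String), Dom_solution s → Spec_solution s (solution s)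

-- ===== LEMMAS AND PROOFS =====

theorem decodeRuns_append (xs ys : List (Nat × Char)) :
    decodeRuns (xs ++ ys) = decodeRuns xs ++ decodeRuns ys := by
  simp [decodeRuns]

-- last element of a decoded run list is a record char (≠ '1')
theorem decodeRuns_getLast (runs : List (Nat × Char)) (hne : runs ≠ [])
    (hinv : ∀ r ∈ runs, r.2 ≠ '1') :
    ∃ c, (decodeRuns runs).getLast? = some c ∧ c ≠ '1' := by
  induction runs using List.reverseRecOn with
  | nil => exact absurd rfl hne
  | append_singleton rs r _ =>
    refine ⟨r.2, ?_, hinv r (by simp)⟩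
    rw [decodeRuns_append]
    show (decodeRuns rs ++ (List.replicate r.1 '1' ++ [r.2] ++ [])).getLast? = some r.2
    rw [List.append_nil, ← List.append_assoc, List.getLast?_concat]

-- the step correspondence: A's stack is decodeRuns runs ++ replicate ones '1'
theorem step_corr (cnt ones : Nat) (runs : List (Nat × Char)) (a : Char)
    (hinv : ∀ r ∈ runs, r.2 ≠ '1') :
    aStep (cnt, decodeRuns runs ++ List.replicate ones '1') a
      = ((bStep (cnt, ones, runs) a).1,
         decodeRuns (bStep (cnt, ones, runs) a).2.2
           ++ List.replicate (bStep (cnt, ones, runs) a).2.1 '1')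
    ∧ ∀ r ∈ (bStep (cnt, ones, runs) a).2.2, r.2 ≠ '1' := by
  by_cases h1 : a = '1'
  · -- push a '1'
    subst h1
    have hcond : ¬ (2 ≤ (decodeRuns runs ++ List.replicate ones '1').length ∧
        PySem.List.slice (decodeRuns runs ++ List.replicate ones '1') (some (-2)) none = ['1', '1'] ∧ '1' = '0') := by
      rintro ⟨-, -, h0⟩; exact absurd h0 (by decide)
    constructor
    · simp only [aStep, bStep]
      rw [if_neg hcond]
      simp [List.replicate_succ']
    · simp only [bStep]
      simpa using hinv
  · by_cases h0 : a = '0' ∧ 2 ≤ ones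
    · -- cancellation
      obtain ⟨ha0, h2⟩ := h0
      have hlen : 2 ≤ (decodeRuns runs ++ List.replicate ones '1').length := by
        simp only [List.length_append, List.length_replicate]; omega
      have hslice : PySem.List.slice (decodeRuns runs ++ List.replicate ones '1') (some (-2)) none = ['1', '1'] := by
        rw [PySem.List.slice_from_neg_ofNat _ 2 (by omega)]
        have hlen2 : (decodeRuns runs ++ List.replicate ones '1').length - 2
            = (decodeRuns runs).length + (ones - 2) := by
          simp only [List.length_append, List.length_replicate]; omega
        rw [hlen2, List.drop_append, List.drop_replicate]
        rw [List.drop_eq_nil_of_le (by omega), List.nil_append]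
        have e2 : ones - ((decodeRuns runs).length + (ones - 2) - (decodeRuns runs).length) = 2 := by
          omega
        rw [e2]; rfl
      have hdl : (decodeRuns runs ++ List.replicate ones '1').dropLast.dropLast
          = decodeRuns runs ++ List.replicate (ones - 2) '1' := by
        obtain ⟨m, hm⟩ : ∃ m, ones = m + 2 := ⟨ones - 2, by omega⟩
        subst hm
        rw [List.replicate_succ' (n := m + 1), List.replicate_succ' (n := m)]
        simp
      constructor
      · simp only [aStep, bStep]
        rw [if_pos (show _ ∧ _ ∧ a = '0' from ⟨hlen, hslice, ha0⟩), if_neg h1,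
          if_pos (show a = '0' ∧ 2 ≤ ones from ⟨ha0, h2⟩), hdl]
      · simp only [bStep]
        rw [if_neg h1, if_pos (show a = '0' ∧ 2 ≤ ones from ⟨ha0, h2⟩)]
        exact hinv
    · -- push a record (ones, a)
      have hcond : ¬ (2 ≤ (decodeRuns runs ++ List.replicate ones '1').length ∧
          PySem.List.slice (decodeRuns runs ++ List.replicate ones '1') (some (-2)) none = ['1', '1'] ∧ a = '0') := by
        rintro ⟨hlen, hsl, ha0⟩
        have h2 : ¬ 2 ≤ ones := fun h => h0 ⟨ha0, h⟩
        -- the second-to-last character of the stack is not '1'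
        rw [PySem.List.slice_from_neg_ofNat _ 2 (by omega)] at hsl
        have hsplit : decodeRuns runs ++ List.replicate ones '1'
            = (decodeRuns runs ++ List.replicate ones '1').take
                ((decodeRuns runs ++ List.replicate ones '1').length - 2) ++ ['1', '1'] := by
          conv_lhs => rw [← List.take_append_drop
            ((decodeRuns runs ++ List.replicate ones '1').length - 2)
            (decodeRuns runs ++ List.replicate ones '1')]
          rw [hsl]
        interval_cases ones
        · -- ones = 0: last char of the stack is a record char
          simp only [List.replicate_zero, List.append_nil] at hsplit hlen
          have hne : runs ≠ [] := by
            intro h; rw [h] at hlen; simp [decodeRuns] at hlen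
          obtain ⟨c, hc, hc1⟩ := decodeRuns_getLast runs hne hinv
          rw [hsplit] at hc
          rw [show (['1', '1'] : List Char) = ['1'] ++ ['1'] from rfl, ← List.append_assoc,
            List.getLast?_concat] at hc
          exact hc1 (by injection hc with h; exact h.symm)
        · -- ones = 1: second-to-last char is a record char
          have hdl := congrArg List.dropLast hsplit
          rw [List.replicate_one] at hdl
          rw [List.dropLast_concat] at hdl
          rw [show (['1', '1'] : List Char)
              = ['1'] ++ ['1'] from rfl, ← List.append_assoc, List.dropLast_concat] at hdl
          have hne : runs ≠ [] := by
            intro h; rw [h] at hlen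
            simp [decodeRuns] at hlen
          obtain ⟨c, hc, hc1⟩ := decodeRuns_getLast runs hne hinv
          rw [hdl, List.getLast?_concat] at hc
          exact hc1 (by injection hc with h; exact h.symm)
      constructor
      · simp only [aStep, bStep]
        rw [if_neg hcond, if_neg h1, if_neg h0, decodeRuns_append]
        simp [decodeRuns]
      · simp only [bStep]
        rw [if_neg h1, if_neg h0]
        intro r hr
        rcases List.mem_append.mp hr with h | h
        · exact hinv r h
        · simp at h; rw [h]; exact h1

-- the fold correspondence
theorem fold_corr (chars : List Char) (cnt ones : Nat) (runs : List (Nat × Char))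
    (hinv : ∀ r ∈ runs, r.2 ≠ '1') :
    chars.foldl aStep (cnt, decodeRuns runs ++ List.replicate ones '1')
      = ((chars.foldl bStep (cnt, ones, runs)).1,
         decodeRuns (chars.foldl bStep (cnt, ones, runs)).2.2
           ++ List.replicate (chars.foldl bStep (cnt, ones, runs)).2.1 '1')
    ∧ ∀ r ∈ (chars.foldl bStep (cnt, ones, runs)).2.2, r.2 ≠ '1' := by
  induction chars generalizing cnt ones runs with
  | nil => exact ⟨rfl, hinv⟩
  | cons a rest ih =>
    obtain ⟨hs, hi⟩ := step_corr cnt ones runs a hinv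
    simp only [List.foldl_cons, hs]
    have := ih (bStep (cnt, ones, runs) a).1 (bStep (cnt, ones, runs) a).2.1
      (bStep (cnt, ones, runs) a).2.2 hi
    exact this

-- A's cnt is monotone along the fold
theorem afold_mono (chars : List Char) (cnt : Nat) (st : List Char) :
    cnt ≤ (chars.foldl aStep (cnt, st)).1 := by
  induction chars generalizing cnt st with
  | nil => simp
  | cons a rest ih =>
    rw [List.foldl_cons]
    by_cases hc : 2 ≤ st.length ∧ PySem.List.slice st (some (-2)) none = ['1', '1'] ∧ a = '0'
    · have he : aStep (cnt, st) a = (cnt + 1, st.dropLast.dropLast) := by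
        simp only [aStep]; rw [if_pos hc]
      rw [he]; exact le_trans (Nat.le_succ cnt) (ih (cnt + 1) _)
    · have he : aStep (cnt, st) a = (cnt, st ++ [a]) := by
        simp only [aStep]; rw [if_neg hc]
      rw [he]; exact ih cnt _

-- when A removes nothing, the stack is the input
theorem afold_cnt0 (chars : List Char) (cnt : Nat) (st : List Char)
    (h : (chars.foldl aStep (cnt, st)).1 = cnt) :
    (chars.foldl aStep (cnt, st)).2 = st ++ chars := by
  induction chars generalizing cnt st with
  | nil => simp
  | cons a rest ih =>
    rw [List.foldl_cons] at h ⊢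
    by_cases hc : 2 ≤ st.length ∧ PySem.List.slice st (some (-2)) none = ['1', '1'] ∧ a = '0'
    · exfalso
      have he : aStep (cnt, st) a = (cnt + 1, st.dropLast.dropLast) := by
        simp only [aStep]; rw [if_pos hc]
      rw [he] at h
      have := afold_mono rest (cnt + 1) st.dropLast.dropLast
      omega
    · have he : aStep (cnt, st) a = (cnt, st ++ [a]) := by
        simp only [aStep]; rw [if_neg hc]
      rw [he] at h ⊢
      rw [ih cnt _ h]; simp

theorem aPopOnes_eq (stack q : List Char) :
    aPopOnes stack q
      = (q ++ stack.reverse.takeWhile (· = '1'), (stack.reverse.dropWhile (· = '1')).reverse) := by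
  induction stack using List.reverseRecOn generalizing q with
  | nil => simp [aPopOnes]
  | append_singleton xs x ih =>
    rw [aPopOnes]
    split
    · rename_i c h
      rw [List.getLast?_concat] at h
      have h' : x = c := by injection h
      subst h'
      simp only [List.dropLast_concat]
      by_cases hx : x = '1'
      · rw [if_pos hx, ih]
        simp [hx]
      · rw [if_neg hx]
        simp [hx]
    · rename_i h
      rw [List.getLast?_concat] at h
      exact absurd h (by simp)

theorem aAddBlocks_eq (n : Nat) (q : List Char) :
    aAddBlocks n q = (List.replicate n ['1', '1', '0']).flatten ++ q := by
  induction n generalizing q with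
  | zero => simp [aAddBlocks]
  | succ m ih =>
    rw [aAddBlocks, ih, List.replicate_succ']
    simp

theorem aPrepend_eq (stack q : List Char) : aPrepend stack q = stack ++ q := by
  induction stack using List.reverseRecOn generalizing q with
  | nil => simp [aPrepend]
  | append_singleton xs x ih =>
    rw [aPrepend]
    split
    · rename_i c h
      rw [List.getLast?_concat] at h
      have h' : x = c := by injection h
      subst h'
      simp only [List.dropLast_concat]
      rw [ih]
      simp
    · rename_i h
      rw [List.getLast?_concat] at h
      exact absurd h (by simp)

-- splitting the reversed stack at the trailing ones
theorem pop_split (runs : List (Nat × Char)) (ones : Nat)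
    (hinv : ∀ r ∈ runs, r.2 ≠ '1') :
    (decodeRuns runs ++ List.replicate ones '1').reverse.takeWhile (· = '1')
        = List.replicate ones '1'
    ∧ ((decodeRuns runs ++ List.replicate ones '1').reverse.dropWhile (· = '1')).reverse
        = decodeRuns runs := by
  rw [List.reverse_append, List.reverse_replicate]
  have htail : (decodeRuns runs).reverse.takeWhile (· = '1') = [] ∧
      (decodeRuns runs).reverse.dropWhile (· = '1') = (decodeRuns runs).reverse := by
    cases hl : (decodeRuns runs).reverse with
    | nil => simp
    | cons x xs =>
      have hne : runs ≠ [] := by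
        intro h; rw [h] at hl; simp [decodeRuns] at hl
      obtain ⟨c, hc, hc1⟩ := decodeRuns_getLast runs hne hinv
      have hhead : (decodeRuns runs).reverse.head? = some c := by
        rw [List.head?_reverse]; exact hc
      rw [hl] at hhead
      have hx : x = c := by injection hhead
      subst hx
      constructor
      · rw [List.takeWhile_cons_of_neg (by simpa using hc1)]
      · rw [List.dropWhile_cons_of_neg (by simpa using hc1)]
  constructor
  · induction ones with
    | zero => simpa using htail.1
    | succ m ihm =>
      rw [List.replicate_succ, List.cons_append,
        List.takeWhile_cons_of_pos (by decide), ihm]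
  · have hdw : ∀ m, (List.replicate m '1' ++ (decodeRuns runs).reverse).dropWhile (· = '1')
        = (decodeRuns runs).reverse := by
      intro m
      induction m with
      | zero => simpa using htail.2
      | succ k ihk =>
        rw [List.replicate_succ, List.cons_append,
          List.dropWhile_cons_of_pos (by decide), ihk]
    rw [hdw, List.reverse_reverse]

theorem per_string (string : String) :
    (if (string.toList.foldl aStep (0, [])).1 = 0 then string
     else String.ofList (aPrepend (aPopOnes (string.toList.foldl aStep (0, [])).2 []).2
            (aAddBlocks (string.toList.foldl aStep (0, [])).1
              (aPopOnes (string.toList.foldl aStep (0, [])).2 []).1)))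
    = String.ofList (decodeRuns (string.toList.foldl bStep (0, 0, [])).2.2
        ++ (List.replicate (string.toList.foldl bStep (0, 0, [])).1 ['1', '1', '0']).flatten
        ++ List.replicate (string.toList.foldl bStep (0, 0, [])).2.1 '1') := by
  obtain ⟨hab, hinv⟩ := fold_corr string.toList 0 0 [] (by simp)
  rw [show (decodeRuns [] ++ List.replicate 0 '1') = ([] : List Char) by simp [decodeRuns]] at hab
  by_cases h0 : (string.toList.foldl aStep (0, [])).1 = 0
  · rw [if_pos h0]
    have hstack := afold_cnt0 string.toList 0 [] h0
    have hbcnt : (string.toList.foldl bStep (0, 0, [])).1 = 0 := by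
      rw [hab] at h0; exact h0
    have hdec : decodeRuns (string.toList.foldl bStep (0, 0, [])).2.2
        ++ List.replicate (string.toList.foldl bStep (0, 0, [])).2.1 '1' = string.toList := by
      have h2 : (string.toList.foldl aStep (0, [])).2
          = decodeRuns (string.toList.foldl bStep (0, 0, [])).2.2
            ++ List.replicate (string.toList.foldl bStep (0, 0, [])).2.1 '1' :=
        congrArg Prod.snd hab
      rw [← h2, hstack]; simp
    rw [hbcnt]
    conv_lhs => rw [← String.ofList_toList (s := string), ← hdec]
    simp
  · rw [if_neg h0]
    have h1 : (string.toList.foldl aStep (0, [])).1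
        = (string.toList.foldl bStep (0, 0, [])).1 := congrArg Prod.fst hab
    have h2 : (string.toList.foldl aStep (0, [])).2
        = decodeRuns (string.toList.foldl bStep (0, 0, [])).2.2
          ++ List.replicate (string.toList.foldl bStep (0, 0, [])).2.1 '1' :=
      congrArg Prod.snd hab
    rw [h1, h2, aPopOnes_eq]
    obtain ⟨htw, hdw⟩ := pop_split _ _ hinv
    rw [aAddBlocks_eq, aPrepend_eq, List.nil_append, htw, hdw]
    simp [List.append_assoc]

theorem foldl_snoc {α β : Type} (F : List β → α → List β) (g : α → β)
    (h : ∀ ans x, F ans x = ans ++ [g x]) (l : List α) (acc : List β) :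
    l.foldl F acc = acc ++ l.map g := by
  induction l generalizing acc with
  | nil => simp
  | cons a rest ih => rw [List.foldl_cons, h, ih, List.map_cons]; simp

-- ===== VERDICT (by name: the statement is the Claim_ definition above) =====
theorem solution_spec : Claim_equal_solution := by
  intro s _
  show solution s = solution_alt s
  unfold solution solution_alt
  rw [foldl_snoc _
        (fun string => String.ofList (decodeRuns (string.toList.foldl bStep (0, 0, [])).2.2
          ++ (List.replicate (string.toList.foldl bStep (0, 0, [])).1 ['1', '1', '0']).flatten
          ++ List.replicate (string.toList.foldl bStep (0, 0, [])).2.1 '1'))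
        ?_ s []]
  · rw [List.nil_append]
  · intro ans string
    show (if (string.toList.foldl aStep (0, [])).1 = 0 then ans ++ [string]
          else ans ++ [String.ofList (aPrepend (aPopOnes (string.toList.foldl aStep (0, [])).2 []).2
                  (aAddBlocks (string.toList.foldl aStep (0, [])).1
                    (aPopOnes (string.toList.foldl aStep (0, [])).2 []).1))]) = _
    have hp := per_string string
    split_ifs with h0
    · rw [if_pos h0] at hp
      exact congrArg (fun z => ans ++ [z]) hp
    · rw [if_neg h0] at hp
      exact congrArg (fun z => ans ++ [z]) hp
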